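-- pv_equiv track=rewrite | github.com/emirsimsek00/signal-forge | backend/nlp/summarizer.py | _mock_summarize
-- ===== SOURCE A (Python) =====
-- def _mock_summarize(text: str) -> str:
--     """Extract first 1-2 sentences as a mock summary."""
--     sentences = []
--     current = []
--     for char in text:
--         current.append(char)
--         if char in ".!?" and len("".join(current).strip()) > 10:
--             sentences.append("".join(current).strip())
--             current = []
--             if len(sentences) >= 2:
--                 break
--     if current and not sentences:
--         sentences.append("".join(current).strip())
--     return " ".join(sentences)[:200]
-- ===== SOURCE B (Python) =====
-- def _mock_summarize(text: str) -> str: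
--     """Extract first 1-2 sentences as a mock summary (single pass, slices the original)."""
--     sentences = []
--     first = last = -1  # bounds of the non-whitespace span of the current sentence
--     for i, ch in enumerate(text):
--         if not ch.isspace():
--             if first == -1:
--                 first = i
--             last = i
--         if ch in ".!?" and first != -1 and last - first + 1 > 10:
--             sentences.append(text[first:last + 1])
--             first = last = -1
--             if len(sentences) >= 2:
--                 break
--     if text and not sentences:
--         sentences.append(text[first:last + 1] if first != -1 else "")
--     return " ".join(sentences)[:200]
-- ===== Notes on version B (the rewrite author's own statement) =====
-- stated objective: alternative
-- what changed: B replaces A's growing char-accumulator with repeated join/strip by a single pass that tracks the first/last non-whitespace index of the current sentence and slices the original string.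
import Mathlib
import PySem

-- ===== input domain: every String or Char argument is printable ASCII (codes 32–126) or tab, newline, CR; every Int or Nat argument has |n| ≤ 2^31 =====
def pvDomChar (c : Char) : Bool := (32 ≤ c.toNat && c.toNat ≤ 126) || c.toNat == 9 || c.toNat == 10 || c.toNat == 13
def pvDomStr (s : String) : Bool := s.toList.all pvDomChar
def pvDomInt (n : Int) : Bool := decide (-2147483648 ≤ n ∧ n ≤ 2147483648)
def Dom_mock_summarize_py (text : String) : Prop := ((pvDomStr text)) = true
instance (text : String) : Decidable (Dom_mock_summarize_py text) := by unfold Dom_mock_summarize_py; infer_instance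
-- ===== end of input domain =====

-- B tracks first/last non-whitespace indices and slices the original string, instead of
-- A's char-accumulator with repeated join/strip; equivalent on all inputs (alternative, not faster).


-- ===== PORT A =====
-- loop of A: state = (sentences, current); 'break' returns the sentence list (the trailing
-- 'if current and not sentences' is then false because sentences is nonempty and current empty)
def pvGoA : List Char → List (List Char) → List Char → List (List Char)
  | [], ss, cur => if cur ≠ [] ∧ ss = [] then ss ++ [PySem.Chars.strip cur] else ss
  | c :: rest, ss, cur =>
    let cur' := cur ++ [c]
    if c ∈ ['.', '!', '?'] ∧ (PySem.Chars.strip cur').length > 10 then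
      let ss' := ss ++ [PySem.Chars.strip cur']
      if ss'.length ≥ 2 then ss' else pvGoA rest ss' []
    else pvGoA rest ss cur'

def mock_summarize_py (text : String) : String :=
  let ss := pvGoA text.toList [] []
  String.ofList (PySem.List.slice (PySem.Chars.join [' '] ss) none (some 200))

-- ===== PORT B =====
-- loop of B: state = (sentences, first, last), first/last = bounds of the non-whitespace
-- span of the current sentence (-1 = none yet); appends a slice of the original text
def pvGoB (full : List Char) : List Char → Nat → List (List Char) → Int → Int → List (List Char)
  | [], _, ss, first, last =>
      if full ≠ [] ∧ ss = [] then
        ss ++ [if first ≠ -1 then PySem.List.slice full (some first) (some (last + 1)) else []]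
      else ss
  | c :: rest, i, ss, first, last =>
      let first' := if ¬ PySem.Chars.isspace c then (if first = -1 then (i : Int) else first) else first
      let last' := if ¬ PySem.Chars.isspace c then (i : Int) else last
      if c ∈ ['.', '!', '?'] ∧ first' ≠ -1 ∧ last' - first' + 1 > 10 then
        let ss' := ss ++ [PySem.List.slice full (some first') (some (last' + 1))]
        if ss'.length ≥ 2 then ss' else pvGoB full rest (i + 1) ss' (-1) (-1)
      else pvGoB full rest (i + 1) ss first' last'

def mock_summarize_py_alt (text : String) : String :=
  let ss := pvGoB text.toList text.toList 0 [] (-1) (-1)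
  String.ofList (PySem.List.slice (PySem.Chars.join [' '] ss) none (some 200))

-- ===== PRECONDITION & SPEC =====
def Spec_mock_summarize_py (text : String) (out : String) : Prop := out = mock_summarize_py_alt text
instance (text : String) (out : String) : Decidable (Spec_mock_summarize_py text out) := by unfold Spec_mock_summarize_py; infer_instance

-- ===== CLAIM (what is proved, stated in full; the proofs are below) =====
def Claim_equal_mock_summarize_py : Prop := ∀ (text : String), Dom_mock_summarize_py text → Spec_mock_summarize_py text (mock_summarize_py text)

-- ===== LEMMAS AND PROOFS =====

theorem pv_rstrip_append_space (ys : List Char) (c : Char) (h : PySem.Chars.isspace c = true) :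
    PySem.Chars.rstrip (ys ++ [c]) = PySem.Chars.rstrip ys := by
  simp [PySem.Chars.rstrip, h]

theorem pv_rstrip_append_nonspace (ys : List Char) (c : Char) (h : PySem.Chars.isspace c = false) :
    PySem.Chars.rstrip (ys ++ [c]) = ys ++ [c] := by
  simp [PySem.Chars.rstrip, h]

theorem pv_strip_all_space (xs : List Char) (h : ∀ x ∈ xs, PySem.Chars.isspace x = true) :
    PySem.Chars.strip xs = [] := by
  have : PySem.Chars.lstrip xs = [] := by
    simp [PySem.Chars.lstrip, List.dropWhile_eq_nil_iff]
    intro x hx; exact h x hx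
  simp [PySem.Chars.strip, this, PySem.Chars.rstrip]

theorem pv_lstrip_append (xs : List Char) (c : Char) (h : PySem.Chars.lstrip xs ≠ []) :
    PySem.Chars.lstrip (xs ++ [c]) = PySem.Chars.lstrip xs ++ [c] := by
  simp only [PySem.Chars.lstrip] at *
  rw [List.dropWhile_append]
  simp [List.isEmpty_iff, h]

theorem pv_take_ext (full : List Char) (f i : Nat) (c : Char) (hfi : f ≤ i) (hget : full[i]? = some c) :
    (full.drop f).take (i + 1 - f) = (full.drop f).take (i - f) ++ [c] := by
  have h1 : i + 1 - f = (i - f) + 1 := by omega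
  rw [h1, List.take_add_one]
  have h2 : (full.drop f)[i - f]? = some c := by
    rw [List.getElem?_drop, Nat.add_sub_cancel' hfi]; exact hget
  simp [h2]

theorem pv_lstrip_allspace_append (xs ys : List Char) (h : ∀ x ∈ xs, PySem.Chars.isspace x = true) :
    PySem.Chars.lstrip (xs ++ ys) = PySem.Chars.lstrip ys := by
  simp only [PySem.Chars.lstrip]
  rw [List.dropWhile_append]
  simp [List.dropWhile_eq_nil_iff.mpr h]

theorem pv_punct_nonspace (c : Char) (h : c ∈ ['.', '!', '?']) : PySem.Chars.isspace c = false := by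
  simp only [List.mem_cons, List.not_mem_nil, or_false] at h
  rcases h with h | h | h <;> subst h <;> decide

theorem pv_main (full : List Char) : ∀ (rest : List Char) (i base : Nat)
    (ss : List (List Char)) (cur : List Char) (first last : Int),
    rest = full.drop i → base ≤ i → i ≤ full.length →
    cur = (full.drop base).take (i - base) →
    (ss = [] → base = 0) →
    ((first = -1 ∧ last = -1 ∧ ∀ x ∈ cur, PySem.Chars.isspace x = true) ∨
      (∃ f l : Nat, first = (f : Int) ∧ last = (l : Int) ∧ base ≤ f ∧ f ≤ l ∧ l < i ∧
        PySem.Chars.lstrip cur = (full.drop f).take (i - f) ∧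
        PySem.Chars.strip cur = (full.drop f).take (l + 1 - f))) →
    pvGoA rest ss cur = pvGoB full rest i ss first last := by
  intro rest
  induction rest with
  | nil =>
    intro i base ss cur first last hrest hbase hi hcur hss hR
    have hil : i = full.length := by
      have := List.drop_eq_nil_iff.mp hrest.symm; omega
    have hcurf : cur = full.drop base := by
      rw [hcur]; apply List.take_of_length_le; simp; omega
    simp only [pvGoA, pvGoB]
    by_cases hE : ss = []
    · have hb0 : base = 0 := hss hE
      rw [hb0, List.drop_zero] at hcurf
      subst hE
      by_cases hF : full = []
      · have hc0 : cur = [] := by rw [hcurf, hF]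
        simp [hc0, hF]
      · have hcne : cur ≠ [] := by rw [hcurf]; exact hF
        rw [if_pos ⟨hcne, rfl⟩, if_pos ⟨hF, rfl⟩]
        congr 1
        rcases hR with ⟨h1, h2, h3⟩ | ⟨f, l, h1, h2, hbf, hfl, hli, hls, hst⟩
        · rw [pv_strip_all_space cur h3, h1]; simp
        · subst h1
          have hne : ((f : Nat) : Int) ≠ -1 := by
            have := Int.natCast_nonneg f; omega
          rw [if_pos hne, hst, h2]
          have hcast : ((l : Nat) : Int) + 1 = ((l + 1 : Nat) : Int) := by push_cast; ring
          rw [hcast, PySem.List.slice_natCast]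
    · simp [hE]
  | cons c rest' ih =>
    intro i base ss cur first last hrest hbase hi hcur hss hR
    have hdrop : full.drop i = c :: rest' := hrest.symm
    have hlt : i < full.length := by
      by_contra h
      have hle : full.length ≤ i := Nat.le_of_not_lt h
      rw [List.drop_eq_nil_iff.mpr hle] at hdrop
      exact absurd hdrop (by simp)
    have hget : full[i]? = some c := by
      have h0 : (full.drop i)[0]? = full[i + 0]? := List.getElem?_drop
      rw [hdrop] at h0
      simpa using h0.symm
    have hrest' : rest' = full.drop (i + 1) := by
      have : full.drop (i + 1) = (full.drop i).drop 1 := by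
        rw [List.drop_drop]
      rw [this, hdrop]; rfl
    have hcur' : cur ++ [c] = (full.drop base).take (i + 1 - base) := by
      rw [pv_take_ext full base i c hbase hget, hcur]
    -- the updated invariant for (cur ++ [c], first', last')
    simp only [pvGoA, pvGoB]
    by_cases hsp : PySem.Chars.isspace c = true
    · -- c is whitespace: not punctuation, B's state unchanged
      have hcp : c ∉ ['.', '!', '?'] := by
        intro h; rw [pv_punct_nonspace c h] at hsp; exact Bool.noConfusion hsp
      have hInv : (first = -1 ∧ last = -1 ∧ ∀ x ∈ cur ++ [c], PySem.Chars.isspace x = true) ∨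
          (∃ f l : Nat, first = (f : Int) ∧ last = (l : Int) ∧ base ≤ f ∧ f ≤ l ∧ l < i + 1 ∧
            PySem.Chars.lstrip (cur ++ [c]) = (full.drop f).take (i + 1 - f) ∧
            PySem.Chars.strip (cur ++ [c]) = (full.drop f).take (l + 1 - f)) := by
        rcases hR with ⟨h1, h2, h3⟩ | ⟨f, l, h1, h2, hbf, hfl, hli, hls, hst⟩
        · left
          refine ⟨h1, h2, ?_⟩
          intro x hx
          rcases List.mem_append.mp hx with hx | hx
          · exact h3 x hx
          · simp only [List.mem_singleton] at hx; subst hx; exact hsp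
        · right
          refine ⟨f, l, h1, h2, hbf, hfl, by omega, ?_, ?_⟩
          · rw [pv_lstrip_append cur c, hls, pv_take_ext full f i c (by omega) hget]
            rw [hls]
            intro hnil
            have : ((full.drop f).take (i - f)).length = 0 := by rw [hnil]; rfl
            simp only [List.length_take, List.length_drop] at this
            omega
          · have hlnil : PySem.Chars.lstrip cur ≠ [] := by
              rw [hls]
              intro hnil
              have : ((full.drop f).take (i - f)).length = 0 := by rw [hnil]; rfl
              simp only [List.length_take, List.length_drop] at this
              omega
            show PySem.Chars.rstrip (PySem.Chars.lstrip (cur ++ [c])) = _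
            rw [pv_lstrip_append cur c hlnil, pv_rstrip_append_space _ c hsp]
            exact hst
      have hc2 : ¬ (c ∈ ['.', '!', '?'] ∧ (PySem.Chars.strip (cur ++ [c])).length > 10) := by
        intro h; exact hcp h.1
      have hc3 : ¬ (c ∈ ['.', '!', '?'] ∧
          (if ¬PySem.Chars.isspace c = true then (if first = -1 then (i : Int) else first) else first) ≠ -1 ∧
          (if ¬PySem.Chars.isspace c = true then (i : Int) else last) -
            (if ¬PySem.Chars.isspace c = true then (if first = -1 then (i : Int) else first) else first) + 1 > 10) := by
        intro h; exact hcp h.1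
      rw [if_neg hc2, if_neg hc3]
      simp only [hsp, not_true, ite_false]
      exact ih (i + 1) base ss (cur ++ [c]) first last hrest' (by omega) hlt hcur' hss hInv
    · -- c is not whitespace
      have hspf : PySem.Chars.isspace c = false := by
        cases h : PySem.Chars.isspace c
        · rfl
        · exact absurd h hsp
      -- first'/last' take the non-whitespace branch
      obtain ⟨f', hf'1, hf'2, hbf', hf'le, hInv⟩ :
          ∃ f' : Nat,
            (if ¬PySem.Chars.isspace c = true then (if first = -1 then (i : Int) else first) else first) = (f' : Int) ∧
            (if ¬PySem.Chars.isspace c = true then (i : Int) else last) = ((i : Nat) : Int) ∧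
            base ≤ f' ∧ f' ≤ i ∧
            PySem.Chars.strip (cur ++ [c]) = (full.drop f').take (i + 1 - f') ∧
            PySem.Chars.lstrip (cur ++ [c]) = (full.drop f').take (i + 1 - f') := by
        rcases hR with ⟨h1, h2, h3⟩ | ⟨f, l, h1, h2, hbf, hfl, hli, hls, hst⟩
        · refine ⟨i, by simp [hspf, h1], by simp [hspf], hbase, le_refl i, ?_, ?_⟩
          · have hls' : PySem.Chars.lstrip (cur ++ [c]) = [c] := by
              rw [pv_lstrip_allspace_append cur [c] h3]
              simp [PySem.Chars.lstrip, hspf]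
            show PySem.Chars.rstrip (PySem.Chars.lstrip (cur ++ [c])) = _
            rw [hls']
            have : PySem.Chars.rstrip [c] = [c] := by
              have := pv_rstrip_append_nonspace [] c hspf
              simpa using this
            rw [this]
            have : (full.drop i).take (i + 1 - i) = [c] := by
              have : i + 1 - i = 1 := by omega
              rw [this, hdrop]; rfl
            rw [this]
          · rw [pv_lstrip_allspace_append cur [c] h3]
            simp only [PySem.Chars.lstrip, List.dropWhile_cons, hspf]
            have : (full.drop i).take (i + 1 - i) = [c] := by
              have : i + 1 - i = 1 := by omega
              rw [this, hdrop]; rfl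
            rw [this]; rfl
        · have hfne : ((f : Nat) : Int) ≠ -1 := by have := Int.natCast_nonneg f; omega
          have hlnil : PySem.Chars.lstrip cur ≠ [] := by
            rw [hls]
            intro hnil
            have : ((full.drop f).take (i - f)).length = 0 := by rw [hnil]; rfl
            simp only [List.length_take, List.length_drop] at this
            omega
          refine ⟨f, by simp [hspf, h1, hfne], by simp [hspf], hbf, by omega, ?_, ?_⟩
          · show PySem.Chars.rstrip (PySem.Chars.lstrip (cur ++ [c])) = _
            rw [pv_lstrip_append cur c hlnil, pv_rstrip_append_nonspace _ c hspf, hls,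
              pv_take_ext full f i c (by omega) hget]
          · rw [pv_lstrip_append cur c hlnil, hls, pv_take_ext full f i c (by omega) hget]
      rw [hf'1, hf'2]
      have hlen : (PySem.Chars.strip (cur ++ [c])).length = i + 1 - f' := by
        rw [hInv.1]
        simp only [List.length_take, List.length_drop]
        omega
      have hfne' : ((f' : Nat) : Int) ≠ -1 := by have := Int.natCast_nonneg f'; omega
      have hcond : ((PySem.Chars.strip (cur ++ [c])).length > 10) ↔
          (((i : Nat) : Int) - (f' : Int) + 1 > 10) := by
        rw [hlen]
        omega
      have hslice : PySem.List.slice full (some ((f' : Nat) : Int)) (some (((i : Nat) : Int) + 1)) =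
          PySem.Chars.strip (cur ++ [c]) := by
        have h1 : ((i : Nat) : Int) + 1 = ((i + 1 : Nat) : Int) := by push_cast; ring
        rw [h1, PySem.List.slice_natCast, hInv.1]
      by_cases hcp : c ∈ ['.', '!', '?']
      · by_cases hbig : (PySem.Chars.strip (cur ++ [c])).length > 10
        · have hA : c ∈ ['.', '!', '?'] ∧ (PySem.Chars.strip (cur ++ [c])).length > 10 := ⟨hcp, hbig⟩
          have hB : c ∈ ['.', '!', '?'] ∧ ((f' : Nat) : Int) ≠ -1 ∧
              ((i : Nat) : Int) - ((f' : Nat) : Int) + 1 > 10 := ⟨hcp, hfne', hcond.mp hbig⟩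
          rw [if_pos hA, if_pos hB, hslice]
          by_cases h2 : (ss ++ [PySem.Chars.strip (cur ++ [c])]).length ≥ 2
          · rw [if_pos h2, if_pos h2]
          · rw [if_neg h2, if_neg h2]
            apply ih (i + 1) (i + 1) _ [] (-1) (-1) hrest' (le_refl _) hlt
            · simp
            · intro h; exact absurd h (by simp)
            · left; exact ⟨rfl, rfl, by simp⟩
        · rw [if_neg (fun h => hbig h.2), if_neg (fun h => hbig (hcond.mpr h.2.2))]
          apply ih (i + 1) base ss (cur ++ [c]) ((f' : Nat) : Int) ((i : Nat) : Int) hrest'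
            (by omega) hlt hcur' hss
          right
          exact ⟨f', i, rfl, rfl, hbf', hf'le, by omega, hInv.2, by
            rw [hInv.1]⟩
      · rw [if_neg (fun h => hcp h.1), if_neg (fun h => hcp h.1)]
        apply ih (i + 1) base ss (cur ++ [c]) ((f' : Nat) : Int) ((i : Nat) : Int) hrest'
          (by omega) hlt hcur' hss
        right
        exact ⟨f', i, rfl, rfl, hbf', hf'le, by omega, hInv.2, by rw [hInv.1]⟩

-- ===== VERDICT (by name: the statement is the Claim_ definition above) =====
theorem mock_summarize_py_spec : Claim_equal_mock_summarize_py := by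
  intro text _
  unfold Spec_mock_summarize_py mock_summarize_py mock_summarize_py_alt
  have h := pv_main text.toList text.toList 0 0 [] [] (-1) (-1)
    (by simp) (Nat.le_refl 0) (by simp) (by simp) (fun _ => rfl)
    (Or.inl ⟨rfl, rfl, by simp⟩)
  rw [h]
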